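-- pv_equiv track=rewrite | github.com/furkan190534/proxytr | proxytr.py | validate_proxy_format
-- ===== SOURCE A (Python) =====
-- def validate_proxy_format(proxy):
--     try:
--         if not proxy or ':' not in proxy:
--             return False
--
--         ip, port = proxy.split(':')
--         ip_parts = ip.split('.')
--
--         if len(ip_parts) != 4:
--             return False
--
--         for part in ip_parts:
--             if not part.isdigit() or not 0 <= int(part) <= 255:
--                 return False
--
--         if not port.isdigit() or not 1 <= int(port) <= 65535:
--             return False
--
--         return True
--     except:
--         return False
-- ===== SOURCE B (Python) =====
-- def validate_proxy_format(proxy):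
--     # One left-to-right scan over the string: four dot-separated octets,
--     # a colon, then the port run, each digit run converted once with int().
--     if not proxy:
--         return False
--     s = proxy
--     n = len(s)
--     i = 0
--     for k in range(4):
--         j = i
--         while j < n and '0' <= s[j] <= '9':
--             j += 1
--         if j == i or not 0 <= int(s[i:j]) <= 255:
--             return False
--         i = j
--         if k < 3:
--             if i == n or s[i] != '.':
--                 return False
--             i += 1
--     if i == n or s[i] != ':':
--         return False
--     i += 1
--     j = i
--     while j < n and '0' <= s[j] <= '9':
--         j += 1
--     if j == i or j < n or not 1 <= int(s[i:j]) <= 65535: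
--         return False
--     return True
-- ===== Notes on version B (the rewrite author's own statement) =====
-- stated objective: alternative
-- what changed: A splits the string on the colon and then on the dots, checking each piece with str.isdigit and re-parsing it with int(); B runs a single left-to-right index scan that consumes four dot-separated digit runs, the colon and the port run in one pass, converting each run once.
import Mathlib
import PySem

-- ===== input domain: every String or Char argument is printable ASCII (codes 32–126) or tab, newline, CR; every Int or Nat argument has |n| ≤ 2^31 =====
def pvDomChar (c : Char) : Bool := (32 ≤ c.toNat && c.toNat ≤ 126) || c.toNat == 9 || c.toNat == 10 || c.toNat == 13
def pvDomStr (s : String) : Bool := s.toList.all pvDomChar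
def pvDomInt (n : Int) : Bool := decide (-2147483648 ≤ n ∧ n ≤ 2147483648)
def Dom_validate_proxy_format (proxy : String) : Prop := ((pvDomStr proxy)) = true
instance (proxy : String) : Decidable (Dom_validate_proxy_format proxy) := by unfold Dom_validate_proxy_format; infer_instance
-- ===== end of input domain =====

-- B replaces A's split/isdigit/int pipeline with a single left-to-right scan of the
-- string (four digit runs separated by '.', then ':', then the port run); objective:
-- alternative (a genuinely different, one-pass parsing strategy of similar cost).

-- ===== PORT A =====
-- the 'for part in ip_parts' loop of A: returns False on the first bad part
def aCheckOctets : List String → Bool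
  | [] => true
  | p :: ps =>
    if ¬ PySem.Str.strIsdigit p then false
    else
      match PySem.Int.ofStr? p with
      | none => false      -- int() ValueError: swallowed by A's bare 'except' → False
      | some v => if ¬ (0 ≤ v ∧ v ≤ 255) then false else aCheckOctets ps

def validate_proxy_format (proxy : String) : Bool :=
  if proxy = "" ∨ PySem.Str.isIn ":" proxy = false then false
  else
    match PySem.Str.split? proxy ":" with
    | some [ip, port] =>                       -- 'ip, port = proxy.split(':')'
      match PySem.Str.split? ip "." with
      | some ip_parts =>
        if ip_parts.length ≠ 4 then false
        else if aCheckOctets ip_parts then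
          if ¬ PySem.Str.strIsdigit port then false
          else
            match PySem.Int.ofStr? port with
            | none => false                    -- caught by the bare 'except'
            | some v => if ¬ (1 ≤ v ∧ v ≤ 65535) then false else true
        else false
      | none => false
    | _ => false                               -- unpacking raises ValueError → except → False

-- ===== PORT B =====
-- the 'while j < n and '0' <= s[j] <= '9'' scan: (digit run s[i:j], rest)
def altScan : List Char → List Char × List Char
  | [] => ([], [])
  | c :: cs =>
    if '0' ≤ c ∧ c ≤ '9' then
      let (tok, rest) := altScan cs
      (c :: tok, rest)
    else ([], c :: cs)

-- the tail of B after the four octets: ':' was consumed, scan the port run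
def altPort (cs : List Char) : Bool :=
  match altScan cs with
  | (tok, rest) =>
    if tok.isEmpty then false                  -- 'j == i'
    else if ¬ rest.isEmpty then false          -- 'j < n'
    else
      match PySem.Int.ofChars? tok with        -- int(s[i:j]); tok is a nonempty digit run
      | none => false                          -- unreachable for a digit run
      | some v => if ¬ (1 ≤ v ∧ v ≤ 65535) then false else true

-- the 'for k in range(4)' loop, k octets still to come after the current one
def altLoop : Nat → List Char → Bool
  | 0, cs =>
    match altScan cs with
    | (tok, rest) =>
      if tok.isEmpty then false
      else
        match PySem.Int.ofChars? tok with
        | none => false                        -- unreachable for a digit run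
        | some v =>
          if ¬ (0 ≤ v ∧ v ≤ 255) then false
          else
            match rest with                    -- 'i == n or s[i] != ':''
            | [] => false
            | r :: cs' => if r ≠ ':' then false else altPort cs'
  | Nat.succ k, cs =>
    match altScan cs with
    | (tok, rest) =>
      if tok.isEmpty then false
      else
        match PySem.Int.ofChars? tok with
        | none => false                        -- unreachable for a digit run
        | some v =>
          if ¬ (0 ≤ v ∧ v ≤ 255) then false
          else
            match rest with                    -- 'i == n or s[i] != '.''
            | [] => false
            | r :: cs' => if r ≠ '.' then false else altLoop k cs'

def validate_proxy_format_alt (proxy : String) : Bool :=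
  if proxy.toList.isEmpty then false           -- 'if not proxy'
  else altLoop 3 proxy.toList

-- ===== PRECONDITION & SPEC =====
def Spec_validate_proxy_format (proxy : String) (out : Bool) : Prop := out = validate_proxy_format_alt proxy
instance (proxy : String) (out : Bool) : Decidable (Spec_validate_proxy_format proxy out) := by unfold Spec_validate_proxy_format; infer_instance

-- ===== CLAIM (what is proved, stated in full; the proofs are below) =====
def Claim_equal_validate_proxy_format : Prop := ∀ (proxy : String), Dom_validate_proxy_format proxy → Spec_validate_proxy_format proxy (validate_proxy_format proxy)

-- ===== LEMMAS AND PROOFS =====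

-- reference single-character splitter: Python's s.split(sep) for a one-char sep
def splitCh (sep : Char) : List Char → List (List Char)
  | [] => [[]]
  | c :: cs => if c = sep then [] :: splitCh sep cs else (splitCh sep cs).modifyHead (c :: ·)

theorem splitCh_ne_nil (sep : Char) (l : List Char) : splitCh sep l ≠ [] := by
  induction l with
  | nil => simp [splitCh]
  | cons c cs ih =>
    simp only [splitCh]
    split
    · simp
    · cases h : splitCh sep cs with
      | nil => exact absurd h ih
      | cons a t => simp [List.modifyHead]

theorem go_single (sep : Char) (fuel : ℕ) : ∀ (l cur acc : _), l.length < fuel →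
    PySem.Chars.splitOn.go [sep] fuel l cur acc
      = acc.reverse ++ (splitCh sep l).modifyHead (cur.reverse ++ ·) := by
  induction fuel with
  | zero => intro l cur acc h; omega
  | succ f ih =>
    intro l cur acc h
    cases l with
    | nil => simp [PySem.Chars.splitOn.go, splitCh]
    | cons c rest =>
      rw [PySem.Chars.splitOn.go]
      by_cases hc : c = sep
      · subst hc
        have hp : List.isPrefixOf [c] (c :: rest) = true := by simp [List.isPrefixOf]
        simp only [hp, if_true, List.length_cons] at *
        rw [ih _ _ _ (by simp at h ⊢; omega)]
        simp [splitCh, List.modifyHead]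
        cases hsc : splitCh c rest with
        | nil => exact absurd hsc (splitCh_ne_nil _ _)
        | cons a t => simp [List.modifyHead]
      · have hp : List.isPrefixOf [sep] (c :: rest) = false := by
          simp [List.isPrefixOf]; intro hh; exact absurd hh.symm hc
        simp only [hp, Bool.false_eq_true, if_false]
        rw [ih _ _ _ (by simp at h ⊢; omega)]
        simp [splitCh, hc]
        cases hsc : splitCh sep rest with
        | nil => exact absurd hsc (splitCh_ne_nil _ _)
        | cons a t => simp [List.modifyHead]

theorem splitOn_single (sep : Char) (l : List Char) :
    PySem.Chars.splitOn l [sep] = splitCh sep l := by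
  rw [PySem.Chars.splitOn, go_single sep _ _ _ _ (by omega)]
  cases h : splitCh sep l with
  | nil => exact absurd h (splitCh_ne_nil _ _)
  | cons a t => simp [List.modifyHead]

-- join with a one-char separator (inverse of splitCh)
def joinSep (sep : Char) : List (List Char) → List Char
  | [] => []
  | [x] => x
  | x :: y :: t => x ++ sep :: joinSep sep (y :: t)

theorem splitCh_shape (sep : Char) : ∀ cs : List Char,
    cs = joinSep sep (splitCh sep cs) ∧ ∀ p ∈ splitCh sep cs, sep ∉ p := by
  intro cs
  induction cs with
  | nil => simp [splitCh, joinSep]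
  | cons c cs ih =>
    obtain ⟨hj, hm⟩ := ih
    by_cases hc : c = sep
    · subst hc
      refine ⟨?_, ?_⟩
      · simp only [splitCh, if_pos rfl]
        cases h : splitCh c cs with
        | nil => exact absurd h (splitCh_ne_nil _ _)
        | cons a t => rw [h] at hj; simp [joinSep, ← hj]
      · intro p hp
        simp only [splitCh, if_pos rfl] at hp
        rcases List.mem_cons.mp hp with h | h
        · simp [h]
        · exact hm p h
    · cases h : splitCh sep cs with
      | nil => exact absurd h (splitCh_ne_nil _ _)
      | cons a t =>
        rw [h] at hj hm
        refine ⟨?_, ?_⟩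
        · simp only [splitCh, if_neg hc, h, List.modifyHead]
          cases t with
          | nil => simp [joinSep] at hj ⊢; exact hj
          | cons b t' => simp [joinSep] at hj ⊢; exact hj
        · intro p hp
          simp only [splitCh, if_neg hc, h, List.modifyHead] at hp
          rcases List.mem_cons.mp hp with h' | h'
          · subst h'
            intro hmem
            rcases List.mem_cons.mp hmem with h'' | h''
            · exact hc h''.symm
            · exact hm a List.mem_cons_self h''
          · exact hm p (List.mem_cons_of_mem _ h')

theorem splitCh_not_mem (sep : Char) (x : List Char) (h : sep ∉ x) : splitCh sep x = [x] := by
  induction x with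
  | nil => simp [splitCh]
  | cons c cs ih =>
    simp only [List.mem_cons, not_or] at h
    simp [splitCh, Ne.symm, h.1, ih h.2, List.modifyHead]

theorem splitCh_append (sep : Char) (x y : List Char) (h : sep ∉ x) :
    splitCh sep (x ++ sep :: y) = x :: splitCh sep y := by
  induction x with
  | nil => simp [splitCh]
  | cons c cs ih =>
    simp only [List.mem_cons, not_or] at h
    simp [splitCh, Ne.symm, h.1, ih h.2, List.modifyHead]

-- grammar of accepted strings: value checks kept abstract through ofChars?
def okOct (x : List Char) : Prop :=
  x ≠ [] ∧ (∀ c ∈ x, '0' ≤ c ∧ c ≤ '9') ∧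
    ∃ v, PySem.Int.ofChars? x = some v ∧ 0 ≤ v ∧ v ≤ 255

def okPort (x : List Char) : Prop :=
  x ≠ [] ∧ (∀ c ∈ x, '0' ≤ c ∧ c ≤ '9') ∧
    ∃ v, PySem.Int.ofChars? x = some v ∧ 1 ≤ v ∧ v ≤ 65535

def Gram (cs : List Char) : Prop :=
  ∃ a b c d p, cs = a ++ '.' :: (b ++ '.' :: (c ++ '.' :: (d ++ ':' :: p))) ∧
    okOct a ∧ okOct b ∧ okOct c ∧ okOct d ∧ okPort p

def isDigC : Char → Bool := fun c => decide ('0' ≤ c ∧ c ≤ '9')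

theorem altScan_eq (cs : List Char) :
    altScan cs = (cs.takeWhile isDigC, cs.dropWhile isDigC) := by
  induction cs with
  | nil => simp [altScan]
  | cons c cs ih =>
    by_cases h : '0' ≤ c ∧ c ≤ '9'
    · simp [altScan, h, ih, List.takeWhile, List.dropWhile, isDigC]
    · simp [altScan, h, List.takeWhile, List.dropWhile, isDigC]

theorem takeWhile_append_of (x : List Char) (c : Char) (y : List Char)
    (hx : ∀ a ∈ x, isDigC a = true) (hc : isDigC c = false) :
    (x ++ c :: y).takeWhile isDigC = x ∧ (x ++ c :: y).dropWhile isDigC = c :: y := by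
  induction x with
  | nil => simp [List.takeWhile, List.dropWhile, hc]
  | cons a t ih =>
    have ha : isDigC a = true := hx a List.mem_cons_self
    have := ih (fun b hb => hx b (List.mem_cons_of_mem _ hb))
    simp [List.takeWhile, List.dropWhile, ha, this.1, this.2]

theorem altPort_iff (cs : List Char) : altPort cs = true ↔ okPort cs := by
  simp only [altPort, altScan_eq]
  constructor
  · intro h
    have h1 : (cs.takeWhile isDigC).isEmpty = false := by
      by_contra hh
      simp only [Bool.not_eq_false] at hh
      simp [hh] at h
    have h2 : (cs.dropWhile isDigC).isEmpty = true := by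
      by_contra hh
      simp only [Bool.not_eq_true] at hh
      simp [h1, hh] at h
    have hall : ∀ c ∈ cs, '0' ≤ c ∧ c ≤ '9' := by
      intro c hc
      have := List.dropWhile_eq_nil_iff.mp (List.isEmpty_iff.mp h2) c hc
      simpa [isDigC] using this
    have hT : cs.takeWhile isDigC = cs :=
      List.takeWhile_eq_self_iff.mpr (fun x hx => by simpa [isDigC] using hall x hx)
    rw [hT] at h h1
    refine ⟨by intro hn; simp [hn] at h1, hall, ?_⟩
    rw [if_neg (by simp [h1]), if_neg (by simp [h2])] at h
    cases hv : PySem.Int.ofChars? cs with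
    | none => rw [hv] at h; simp at h
    | some v =>
      rw [hv] at h
      by_cases hr : 1 ≤ v ∧ v ≤ 65535
      · exact ⟨v, rfl, hr⟩
      · simp [hr] at h
  · rintro ⟨hne, hall, v, hv, hr⟩
    have hT : cs.takeWhile isDigC = cs :=
      List.takeWhile_eq_self_iff.mpr (fun x hx => by simpa [isDigC] using hall x hx)
    have hD : cs.dropWhile isDigC = [] :=
      List.dropWhile_eq_nil_iff.mpr (fun x hx => by simpa [isDigC] using hall x hx)
    rw [hT, hD, hv]
    simp [hne, hr]

theorem altLoop_head (sep : Char) (next : List Char → Bool) (cs : List Char)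
    (hsep : isDigC sep = false)
    (body : List Char → Bool)
    (hbody : body = fun cs =>
      match altScan cs with
      | (tok, rest) =>
        if tok.isEmpty then false
        else
          match PySem.Int.ofChars? tok with
          | none => false
          | some v =>
            if ¬ (0 ≤ v ∧ v ≤ 255) then false
            else
              match rest with
              | [] => false
              | r :: cs' => if r ≠ sep then false else next cs') :
    body cs = true ↔ ∃ a r, cs = a ++ sep :: r ∧ okOct a ∧ next r = true := by
  subst hbody
  simp only [altScan_eq]
  constructor
  · intro h
    have h1 : (cs.takeWhile isDigC).isEmpty = false := by
      by_contra hh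
      simp only [Bool.not_eq_false] at hh
      simp [hh] at h
    rw [if_neg (by simp [h1])] at h
    cases hv : PySem.Int.ofChars? (cs.takeWhile isDigC) with
    | none => rw [hv] at h; simp at h
    | some v =>
      rw [hv] at h
      by_cases hr : 0 ≤ v ∧ v ≤ 255
      · simp only [hr, not_true_eq_false, if_false] at h
        cases hD : cs.dropWhile isDigC with
        | nil => rw [hD] at h; simp at h
        | cons r cs' =>
          rw [hD] at h
          by_cases hrr : r = sep
          · subst hrr
            simp only [ne_eq, not_true_eq_false, if_false, reduceIte] at h
            refine ⟨cs.takeWhile isDigC, cs', ?_, ?_, h⟩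
            · conv_lhs => rw [← List.takeWhile_append_dropWhile (p := isDigC) (l := cs)]
              rw [hD]
            · refine ⟨by intro hn; simp [hn] at h1, ?_, v, hv, hr⟩
              intro c hc
              have := List.mem_takeWhile_imp hc
              simpa [isDigC] using this
          · simp [hrr] at h
      · simp [hr] at h
  · rintro ⟨a, r, rfl, ⟨hne, hall, v, hv, hr⟩, hnext⟩
    have hx : ∀ c ∈ a, isDigC c = true := fun c hc => by simpa [isDigC] using hall c hc
    obtain ⟨hT, hD⟩ := takeWhile_append_of a sep r hx hsep
    rw [hT, hD, hv]
    simp [hne, hr, hnext]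

theorem altLoop_zero_iff (cs : List Char) :
    altLoop 0 cs = true ↔ ∃ d p, cs = d ++ ':' :: p ∧ okOct d ∧ altPort p = true :=
  altLoop_head ':' altPort cs (by decide) (altLoop 0) rfl

theorem altLoop_succ_iff (k : Nat) (cs : List Char) :
    altLoop (k + 1) cs = true ↔ ∃ a r, cs = a ++ '.' :: r ∧ okOct a ∧ altLoop k r = true :=
  altLoop_head '.' (altLoop k) cs (by decide) (altLoop (k + 1)) rfl

theorem altLoop_three_iff (cs : List Char) : altLoop 3 cs = true ↔ Gram cs := by
  rw [show (3 : Nat) = 2 + 1 from rfl, altLoop_succ_iff]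
  constructor
  · rintro ⟨a, r1, rfl, ha, h1⟩
    rw [altLoop_succ_iff] at h1
    obtain ⟨b, r2, rfl, hb, h2⟩ := h1
    rw [altLoop_succ_iff] at h2
    obtain ⟨c, r3, rfl, hc, h3⟩ := h2
    rw [altLoop_zero_iff] at h3
    obtain ⟨d, p, rfl, hd, hp⟩ := h3
    exact ⟨a, b, c, d, p, rfl, ha, hb, hc, hd, (altPort_iff p).mp hp⟩
  · rintro ⟨a, b, c, d, p, rfl, ha, hb, hc, hd, hp⟩
    refine ⟨a, _, rfl, ha, ?_⟩
    rw [altLoop_succ_iff]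
    refine ⟨b, _, rfl, hb, ?_⟩
    rw [altLoop_succ_iff]
    refine ⟨c, _, rfl, hc, ?_⟩
    rw [altLoop_zero_iff]
    exact ⟨d, p, rfl, hd, (altPort_iff p).mpr hp⟩

theorem B_iff (proxy : String) : validate_proxy_format_alt proxy = true ↔ Gram proxy.toList := by
  rw [validate_proxy_format_alt]
  by_cases he : proxy.toList.isEmpty
  · rw [if_pos he]
    constructor
    · intro h; exact absurd h (by simp)
    rintro ⟨a, b, c, d, p, hdec, -⟩
    rw [List.isEmpty_iff.mp he] at hdec
    exact absurd hdec.symm (by simp)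
  · rw [if_neg he, altLoop_three_iff]

theorem strIsdigit_iff (x : List Char) :
    PySem.Chars.strIsdigit x = true ↔ x ≠ [] ∧ ∀ c ∈ x, '0' ≤ c ∧ c ≤ '9' := by
  simp [PySem.Chars.strIsdigit, PySem.Chars.isdigit, List.all_eq_true]

theorem aCheckOctets_cons (x : List Char) (ps : List String) :
    aCheckOctets (String.ofList x :: ps) = true ↔ okOct x ∧ aCheckOctets ps = true := by
  rw [aCheckOctets]
  have hsd : PySem.Str.strIsdigit (String.ofList x) = PySem.Chars.strIsdigit x := by
    rw [PySem.Str.strIsdigit]; simp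
  rw [hsd, PySem.Int.ofStr?_ofList]
  constructor
  · intro h
    by_cases hd : PySem.Chars.strIsdigit x = true
    · rw [if_neg (by simp [hd])] at h
      cases hv : PySem.Int.ofChars? x with
      | none => rw [hv] at h; simp at h
      | some v =>
        rw [hv] at h
        by_cases hr : 0 ≤ v ∧ v ≤ 255
        · simp only [hr, not_true_eq_false, if_false] at h
          obtain ⟨hne, hall⟩ := (strIsdigit_iff x).mp hd
          exact ⟨⟨hne, hall, v, hv, hr⟩, h⟩
        · simp [hr] at h
    · simp [hd] at h
  · rintro ⟨⟨hne, hall, v, hv, hr⟩, hps⟩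
    rw [(strIsdigit_iff x).mpr ⟨hne, hall⟩, hv]
    simp [hr, hps]

theorem digit_ne {c : Char} (h : '0' ≤ c ∧ c ≤ '9') : c ≠ ':' ∧ c ≠ '.' := by
  constructor <;> rintro rfl
  · exact absurd h.2 (by decide)
  · exact absurd h.1 (by decide)

theorem aPortCheck_iff (y : List Char) :
    (if ¬ PySem.Str.strIsdigit (String.ofList y) then false
     else match PySem.Int.ofStr? (String.ofList y) with
       | none => false
       | some v => if ¬ (1 ≤ v ∧ v ≤ 65535) then false else true) = true ↔ okPort y := by
  have hsd : PySem.Str.strIsdigit (String.ofList y) = PySem.Chars.strIsdigit y := by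
    rw [PySem.Str.strIsdigit]; simp
  rw [hsd, PySem.Int.ofStr?_ofList]
  constructor
  · intro h
    by_cases hd : PySem.Chars.strIsdigit y = true
    · rw [if_neg (by simp [hd])] at h
      cases hv : PySem.Int.ofChars? y with
      | none => rw [hv] at h; simp at h
      | some v =>
        rw [hv] at h
        by_cases hr : 1 ≤ v ∧ v ≤ 65535
        · obtain ⟨hne, hall⟩ := (strIsdigit_iff y).mp hd
          exact ⟨hne, hall, v, hv, hr⟩
        · simp [hr] at h
    · simp [hd] at h
  · rintro ⟨hne, hall, v, hv, hr⟩
    rw [(strIsdigit_iff y).mpr ⟨hne, hall⟩, hv]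
    simp [hr]

theorem gram_splitColon {a b c d p : List Char}
    (ha : okOct a) (hb : okOct b) (hc : okOct c) (hd : okOct d) (hp : okPort p) :
    splitCh ':' (a ++ '.' :: (b ++ '.' :: (c ++ '.' :: (d ++ ':' :: p)))) =
      [a ++ '.' :: (b ++ '.' :: (c ++ '.' :: d)), p] := by
  have hno : ∀ x : List Char, (∀ c ∈ x, '0' ≤ c ∧ c ≤ '9') → (':' : Char) ∉ x := by
    intro x hall hm
    exact (digit_ne (hall _ hm)).1 rfl
  have h1 : (':' : Char) ∉ a ++ '.' :: (b ++ '.' :: (c ++ '.' :: d)) := by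
    simp only [List.mem_append, List.mem_cons, not_or]
    exact ⟨hno a ha.2.1, by decide, hno b hb.2.1, by decide, hno c hc.2.1, by decide, hno d hd.2.1⟩
  rw [show a ++ '.' :: (b ++ '.' :: (c ++ '.' :: (d ++ ':' :: p)))
        = (a ++ '.' :: (b ++ '.' :: (c ++ '.' :: d))) ++ ':' :: p by simp,
    splitCh_append ':' _ _ h1, splitCh_not_mem ':' _ (hno p hp.2.1)]

theorem gram_splitDot {a b c d : List Char}
    (ha : okOct a) (hb : okOct b) (hc : okOct c) (hd : okOct d) :
    splitCh '.' (a ++ '.' :: (b ++ '.' :: (c ++ '.' :: d))) = [a, b, c, d] := by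
  have hno : ∀ x : List Char, (∀ c ∈ x, '0' ≤ c ∧ c ≤ '9') → ('.' : Char) ∉ x := by
    intro x hall hm
    exact (digit_ne (hall _ hm)).2 rfl
  rw [splitCh_append '.' _ _ (hno a ha.2.1), splitCh_append '.' _ _ (hno b hb.2.1),
    splitCh_append '.' _ _ (hno c hc.2.1), splitCh_not_mem '.' _ (hno d hd.2.1)]

theorem A_iff (proxy : String) : validate_proxy_format proxy = true ↔ Gram proxy.toList := by
  rw [validate_proxy_format]
  have hsp : PySem.Str.split? proxy ":" = some ((splitCh ':' proxy.toList).map String.ofList) := by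
    rw [PySem.Str.split?, show (":" : String).toList = [':'] from rfl, PySem.Chars.split?]
    simp [splitOn_single]
  by_cases hg : proxy = "" ∨ PySem.Str.isIn ":" proxy = false
  · rw [if_pos hg]
    constructor
    · intro h; exact absurd h (by simp)
    · rintro ⟨a, b, c, d, p, hdec, ha, hb, hc, hd, hp⟩
      rcases hg with hg | hg
      · rw [hg] at hdec
        exact absurd hdec.symm (by simp)
      · exfalso
        rw [← Bool.not_eq_true, PySem.Str.isIn_iff_infix] at hg
        apply hg
        rw [hdec, show (":" : String).toList = [':'] from rfl]
        exact ⟨a ++ '.' :: (b ++ '.' :: (c ++ '.' :: d)), p, by simp⟩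
  · rw [if_neg hg, hsp]
    rcases hx : splitCh ':' proxy.toList with - | ⟨x, - | ⟨y, - | ⟨z, t⟩⟩⟩
    · exact absurd hx (splitCh_ne_nil _ _)
    · constructor
      · intro h; simp at h
      · rintro ⟨a, b, c, d, p, hdec, ha, hb, hc, hd, hp⟩
        rw [hdec, gram_splitColon ha hb hc hd hp] at hx
        exact absurd hx (by simp)
    · constructor
      · intro h
        simp only [List.map] at h
        have hsp2 : PySem.Str.split? (String.ofList x) "." = some ((splitCh '.' x).map String.ofList) := by
          rw [PySem.Str.split?, show ("." : String).toList = ['.'] from rfl, PySem.Chars.split?]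
          simp [splitOn_single, String.toList_ofList]
        rw [hsp2] at h
        rcases hx2 : splitCh '.' x with - | ⟨a, - | ⟨b, - | ⟨c, - | ⟨d, - | ⟨e, t'⟩⟩⟩⟩⟩
        · exact absurd hx2 (splitCh_ne_nil _ _)
        all_goals rw [hx2] at h
        · simp at h
        · simp at h
        · simp at h
        · -- exactly four parts
          simp only [List.map, List.length_cons, List.length_nil] at h
          rw [if_neg (by norm_num)] at h
          by_cases hco : aCheckOctets [String.ofList a, String.ofList b, String.ofList c, String.ofList d] = true
          · rw [if_pos hco] at h
            obtain ⟨ha, hco⟩ := (aCheckOctets_cons a _).mp hco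
            obtain ⟨hb, hco⟩ := (aCheckOctets_cons b _).mp hco
            obtain ⟨hc, hco⟩ := (aCheckOctets_cons c _).mp hco
            obtain ⟨hd, -⟩ := (aCheckOctets_cons d _).mp hco
            have hp : okPort y := (aPortCheck_iff y).mp h
            refine ⟨a, b, c, d, y, ?_, ha, hb, hc, hd, hp⟩
            have h1 := (splitCh_shape ':' proxy.toList).1
            rw [hx] at h1
            have h2 := (splitCh_shape '.' x).1
            rw [hx2] at h2
            rw [h1]
            simp only [joinSep] at h2 ⊢
            rw [h2]
            simp
          · rw [if_neg hco] at h; simp at h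
        · simp at h
      · rintro ⟨a, b, c, d, p, hdec, ha, hb, hc, hd, hp⟩
        rw [hdec, gram_splitColon ha hb hc hd hp] at hx
        obtain ⟨hx1, hx2⟩ : a ++ '.' :: (b ++ '.' :: (c ++ '.' :: d)) = x ∧ p = y := by
          simpa using hx
        have hsp2 : ∀ z : List Char, PySem.Str.split? (String.ofList z) "." = some ((splitCh '.' z).map String.ofList) := by
          intro z
          rw [PySem.Str.split?, show ("." : String).toList = ['.'] from rfl, PySem.Chars.split?]
          simp [splitOn_single, String.toList_ofList]
        subst hx1; subst hx2
        simp only [List.map]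
        rw [hsp2, gram_splitDot ha hb hc hd]
        simp only [List.map, List.length_cons, List.length_nil]
        rw [if_neg (by norm_num),
          if_pos ((aCheckOctets_cons a _).mpr ⟨ha, (aCheckOctets_cons b _).mpr ⟨hb,
            (aCheckOctets_cons c _).mpr ⟨hc, (aCheckOctets_cons d _).mpr ⟨hd, rfl⟩⟩⟩⟩)]
        exact (aPortCheck_iff p).mpr hp
    · constructor
      · intro h; simp at h
      · rintro ⟨a, b, c, d, p, hdec, ha, hb, hc, hd, hp⟩
        rw [hdec, gram_splitColon ha hb hc hd hp] at hx
        exact absurd hx (by simp)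


-- ===== VERDICT (by name: the statement is the Claim_ definition above) =====
theorem validate_proxy_format_spec : Claim_equal_validate_proxy_format := by
  intro proxy _
  unfold Spec_validate_proxy_format
  have h : (validate_proxy_format proxy = true) ↔ (validate_proxy_format_alt proxy = true) :=
    (A_iff proxy).trans (B_iff proxy).symm
  cases hA : validate_proxy_format proxy <;> cases hB : validate_proxy_format_alt proxy <;> simp_all
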